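/-
  THE CONTRACTS OF THE HEAP (c/base/heap.c: `malloc calloc free realloc reallocarray` and the static helpers `heap_alloc`
  `heap_live_size` `heap_product_ok`; base version 2), ON THE BASE IMAGE.

  The contracts are those of the shared package (ProgX/Spec/Heap.lean, stated for any program record `T : ProgX.Text`, where every
  one of them is described); the names of this file are their instances at `ProgX.Base.T` (abbreviations: a hypothesis about one is
  a hypothesis about the other), as ProgX/Base/Spec/Libc.lean does for `memset` and `memcpy`. Ghost parameters of every Spec: the
  heap `H`, the other live objects `rest`, the active protected frames `frames`; `free` adds the size `n` of the object it is
  called for, `realloc` and `reallocarray` its size `n` and its capacity `c`. `heap_live_size` and `heap_product_ok` do not mention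
  the text record at all: their instances are the generic Specs themselves.

  ProgX/Spec/HeapWords.lean (the machine-word facts the proofs of the eight functions share) is imported here, so that a proof that
  imports its statement has them.

  WHO USES THESE NAMES: the statements and proofs of the heap's eight functions (ProgX/Base/Spec/Units, ProgX/Base/Spec/Proved) and
  every program on the base image that calls `malloc` … `reallocarray`.
-/
import ProgX.Base.Spec.Basic
import ProgX.Base.Spec.Runtime
import ProgX.Base.Spec.Libc
import ProgX.Spec.Heap
import ProgX.Spec.HeapWords
namespace ProgX.Base.Spec
open X86 X86.User Asan

/-- **The common precondition of the heap's functions**, on the base image: the generic `ProgX.Spec.HeapPre`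
(ProgX/Spec/Heap.lean) at the text record `ProgX.Base.T`. Its fields and lemmas (`.inv .base .limit .text .offText`,
`.shadowPre .callee .raise_back .of_inv`) are the generic ones: dot notation finds them through the abbreviation. -/
abbrev HeapPre (H : Heap) (rest : List Obj) (frames : List (Nat × FrameLayout)) (u : State) : Prop :=
  ProgX.Spec.HeapPre T H rest frames u

/-- **`heap_live_size(rdi = p)`** (static helper of heap.c), on the base image: the generic contract
`ProgX.Spec.heap_live_size.spec` (ProgX/Spec/Heap.lean, where it is described); it does not depend on the text record. -/
abbrev heap_live_size.spec (H : Heap) (n : Nat) : Spec :=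
  ProgX.Spec.heap_live_size.spec H n

/-- **`heap_product_ok(rdi = k, rsi = s)`** (static helper of heap.c), on the base image: the generic contract
`ProgX.Spec.heap_product_ok.spec` (ProgX/Spec/Heap.lean, where it is described); it does not depend on the text record. -/
abbrev heap_product_ok.spec : Spec :=
  ProgX.Spec.heap_product_ok.spec

/-- **`heap_alloc(rdi = n, rsi = c)`** (static helper of heap.c), on the base image: the generic contract
`ProgX.Spec.heap_alloc.spec` (ProgX/Spec/Heap.lean, where it is described) at the text record `ProgX.Base.T`. -/
abbrev heap_alloc.spec (H : Heap) (rest : List Obj) (frames : List (Nat × FrameLayout)) : Spec :=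
  ProgX.Spec.heap_alloc.spec T H rest frames

/-- **`malloc(rdi = n)`**, on the base image: the generic contract `ProgX.Spec.malloc.spec` (ProgX/Spec/Heap.lean, where it is
described) at the text record `ProgX.Base.T`. -/
abbrev malloc.spec (H : Heap) (rest : List Obj) (frames : List (Nat × FrameLayout)) : Spec :=
  ProgX.Spec.malloc.spec T H rest frames

/-- **`calloc(rdi = k, rsi = s)`**, on the base image: the generic contract `ProgX.Spec.calloc.spec` (ProgX/Spec/Heap.lean, where it
is described) at the text record `ProgX.Base.T`. -/
abbrev calloc.spec (H : Heap) (rest : List Obj) (frames : List (Nat × FrameLayout)) : Spec :=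
  ProgX.Spec.calloc.spec T H rest frames

/-- **`free(rdi = p)`** for the live object `(p, n)` (or `p = 0`), on the base image: the generic contract `ProgX.Spec.free.spec`
(ProgX/Spec/Heap.lean, where it is described) at the text record `ProgX.Base.T`. -/
abbrev free.spec (H : Heap) (rest : List Obj) (frames : List (Nat × FrameLayout)) (n : Nat) : Spec :=
  ProgX.Spec.free.spec T H rest frames n

/-- **`realloc(rdi = p, rsi = m)`** for the live object `(p, n)` of capacity `c` (or `p = 0`), on the base image: the generic
contract `ProgX.Spec.realloc.spec` (ProgX/Spec/Heap.lean, where it is described) at the text record `ProgX.Base.T`. -/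
abbrev realloc.spec (H : Heap) (rest : List Obj) (frames : List (Nat × FrameLayout)) (n c : Nat) : Spec :=
  ProgX.Spec.realloc.spec T H rest frames n c

/-- **`reallocarray(rdi = p, rsi = k, rdx = s)`** for the live object `(p, n)` of capacity `c` (or `p = 0`), on the base image: the
generic contract `ProgX.Spec.reallocarray.spec` (ProgX/Spec/Heap.lean, where it is described) at the text record `ProgX.Base.T`. -/
abbrev reallocarray.spec (H : Heap) (rest : List Obj) (frames : List (Nat × FrameLayout)) (n c : Nat) : Spec :=
  ProgX.Spec.reallocarray.spec T H rest frames n c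

/-! The postconditions, the `vspec` rewrite rules (frame sizes, footprints) and the lemmas for a client are the generic ones
(`HeapWindow` … `reallocarray_same_heap`: the footprint of `realloc` / `reallocarray`, ProgX/Spec/Heap.lean "THE FOOTPRINT OF `realloc`"). -/
export ProgX.Spec (
  FailPost AllocPost ReallocPost free_keeps
  HeapWindow sameExcept_heapWindows reallocWrites reallocWrites_inside sameExcept_wrap
  heapClip heapFloor heapClip_le heapClip_le_self heapClip_of_le le_heapFloor self_le_heapFloor heapFloor_of_le
  realloc.spec_writes_inside reallocarray.spec_writes_inside realloc_same_heap reallocarray_same_heap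
  heap_live_size.spec_frame heap_live_size.spec_writes heap_product_ok.spec_frame heap_product_ok.spec_writes
  heap_alloc.spec_frame heap_alloc.spec_writes malloc.spec_frame malloc.spec_writes calloc.spec_frame calloc.spec_writes
  free.spec_frame free.spec_writes realloc.spec_frame realloc.spec_writes reallocarray.spec_frame reallocarray.spec_writes)

end ProgX.Base.Spec
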